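-- pv_equiv track=rewrite | github.com/lydiateinfalt/DATS6501-Capstone-Fall2022 | urbanareas_tutorials.py | element_in_common
-- ===== SOURCE A (Python) =====
-- def element_in_common(l1, l2):
--     '''
--     Function that takes two lists and returns same (or True) if they have at least one.
--     '''
--     m = len(l1)
--     n = len(l2)
--     index = -99
--     for i in range (0, m):
--         if l1[i] in l2:
--             index = i
--     return index
-- ===== SOURCE B (Python) =====
-- def element_in_common(l1, l2):
--     '''
--     Last index in l1 whose element appears in l2; -99 if none.
--     '''
--     for i in range(len(l1) - 1, -1, -1):
--         if l1[i] in l2: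
--             return i
--     return -99
-- ===== Notes on version B (the rewrite author's own statement) =====
-- stated objective: idiomatic
-- what changed: B scans l1 from the last index downward and returns at the first element found in l2 (short-circuit early return), instead of A's full forward scan that overwrites a running result.
import Mathlib
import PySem

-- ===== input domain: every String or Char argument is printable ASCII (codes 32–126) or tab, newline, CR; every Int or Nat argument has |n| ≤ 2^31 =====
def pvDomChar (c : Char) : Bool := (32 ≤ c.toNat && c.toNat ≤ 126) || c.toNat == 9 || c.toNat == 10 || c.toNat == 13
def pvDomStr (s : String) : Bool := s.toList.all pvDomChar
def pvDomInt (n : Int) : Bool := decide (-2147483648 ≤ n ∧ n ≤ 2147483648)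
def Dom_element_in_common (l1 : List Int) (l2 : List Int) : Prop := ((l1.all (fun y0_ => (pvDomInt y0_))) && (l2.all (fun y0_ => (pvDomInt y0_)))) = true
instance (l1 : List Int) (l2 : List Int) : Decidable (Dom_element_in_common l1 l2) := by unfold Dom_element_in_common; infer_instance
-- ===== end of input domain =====

-- B replaces A's full forward scan (which overwrites a running result) by a reverse,
-- short-circuiting scan from the last index; same return value, idiomatic early return.

-- ===== PORT A =====
-- for i in range(0, m): if l1[i] in l2: index = i   (l1[i] is always in range here)
def element_in_common (l1 : List Int) (l2 : List Int) : Int :=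
  let m : Int := (l1.length : Int)
  (PySem.List.pyRange 0 m 1).foldl
    (fun index i => if l2.contains (PySem.List.pyGetD l1 i 0) then i else index) (-99)

-- ===== PORT B =====
-- for i in range(len(l1)-1, -1, -1): if l1[i] in l2: return i  — recursion on the count
-- of indices not yet tried; step k+1 inspects index k, i.e. indices are tried downward.
def eicGo (l1 : List Int) (l2 : List Int) : Nat → Int
  | 0 => -99
  | k + 1 =>
    if l2.contains (PySem.List.pyGetD l1 (k : Int) 0) then (k : Int)
    else eicGo l1 l2 k

def element_in_common_alt (l1 : List Int) (l2 : List Int) : Int :=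
  eicGo l1 l2 l1.length

-- ===== PRECONDITION & SPEC =====
def Spec_element_in_common (l1 : List Int) (l2 : List Int) (out : Int) : Prop := out = element_in_common_alt l1 l2
instance (l1 : List Int) (l2 : List Int) (out : Int) : Decidable (Spec_element_in_common l1 l2 out) := by unfold Spec_element_in_common; infer_instance

-- ===== CLAIM (what is proved, stated in full; the proofs are below) =====
def Claim_equal_element_in_common : Prop := ∀ (l1 : List Int) (l2 : List Int), Dom_element_in_common l1 l2 → Spec_element_in_common l1 l2 (element_in_common l1 l2)

-- ===== LEMMAS AND PROOFS =====

-- A's fold over range(0, n) computes the same value as B's downward recursion with n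
-- indices left: peeling the last element of the range matches one step of eicGo.
theorem eic_foldl_eq_go (l1 l2 : List Int) (n : Nat) :
    (PySem.List.pyRange 0 (n : Int) 1).foldl
      (fun index i => if l2.contains (PySem.List.pyGetD l1 i 0) then i else index) (-99)
    = eicGo l1 l2 n := by
  induction n with
  | zero => rfl
  | succ k ih =>
    have h : ((k : Int) + 1) = ((k + 1 : Nat) : Int) := by push_cast; ring
    rw [eicGo, ← h, PySem.List.pyRange_one_succ_right (by positivity),
        List.foldl_append, ih]
    simp

-- ===== VERDICT (by name: the statement is the Claim_ definition above) =====
theorem element_in_common_spec : Claim_equal_element_in_common := by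
  intro l1 l2 _
  unfold Spec_element_in_common element_in_common element_in_common_alt
  exact eic_foldl_eq_go l1 l2 l1.length
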